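-- pv_equiv track=rewrite | github.com/wzygxr/shuati | class094_TreeDP/Code14_TreeDPComprehensive.py | tree_steiner_tree
-- ===== SOURCE A (Python) =====
-- import heapq
-- from typing import List, Tuple, Set, Dict, Optional
--
-- def tree_steiner_tree(graph: List[List[Tuple[int, int]]],
--                      terminals: List[int]) -> int:
--     """
--     5. 树上最小斯坦纳树（Steiner Tree）
--     问题描述：连接关键点的最小权重子树
--     算法要点：状态压缩DP + 树形DP
--     时间复杂度: O(3^k * n + 2^k * n²), 空间复杂度: O(2^k * n)
--     """
--     n = len(graph)
--     k = len(terminals)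
--
--     # 状态压缩：每个终端节点对应一个bit
--     INF = 10**9
--     dp = [[INF] * n for _ in range(1 << k)]
--
--     # 初始化：单个终端节点
--     for i, terminal in enumerate(terminals):
--         dp[1 << i][terminal] = 0
--
--     # 状态转移
--     for mask in range(1, 1 << k):
--         # 子树合并
--         for u in range(n):
--             submask = (mask - 1) & mask
--             while submask > 0:
--                 dp[mask][u] = min(dp[mask][u],
--                                 dp[submask][u] + dp[mask ^ submask][u])
--                 submask = (submask - 1) & mask
--
--         # Dijkstra-like relaxation
--         pq = []
--         for u in range(n):
--             if dp[mask][u] < INF: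
--                 heapq.heappush(pq, (dp[mask][u], u))
--
--         while pq:
--             dist, u = heapq.heappop(pq)
--             if dist > dp[mask][u]:
--                 continue
--
--             for v, weight in graph[u]:
--                 new_dist = dist + weight
--                 if new_dist < dp[mask][v]:
--                     dp[mask][v] = new_dist
--                     heapq.heappush(pq, (new_dist, v))
--
--     # 找到最小权重和
--     min_cost = min(dp[(1 << k) - 1])
--     return min_cost
-- ===== SOURCE B (Python) =====
-- def tree_steiner_tree(graph, terminals):
--     """Steiner tree DP; Dijkstra relaxation done with an array-based scan
--     (visited flags + linear min search) instead of a lazy heap."""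
--     n = len(graph)
--     k = len(terminals)
--
--     INF = 10**9
--     dp = [[INF] * n for _ in range(1 << k)]
--
--     for i, terminal in enumerate(terminals):
--         dp[1 << i][terminal] = 0
--
--     for mask in range(1, 1 << k):
--         row = dp[mask]
--         # subtree merge (same recurrence as the original)
--         for u in range(n):
--             submask = (mask - 1) & mask
--             while submask > 0:
--                 row[u] = min(row[u], dp[submask][u] + dp[mask ^ submask][u])
--                 submask = (submask - 1) & mask
--
--         # array-based Dijkstra: n rounds of linear min-scan over unvisited nodes
--         visited = [False] * n
--         for _ in range(n):
--             best = -1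
--             for u in range(n):
--                 if not visited[u] and row[u] < INF and (best < 0 or row[u] < row[best]):
--                     best = u
--             if best < 0:
--                 break
--             visited[best] = True
--             du = row[best]
--             for v, w in graph[best]:
--                 if du + w < row[v]:
--                     row[v] = du + w
--
--     return min(dp[(1 << k) - 1])
-- ===== Notes on version B (the rewrite author's own statement) =====
-- stated objective: alternative
-- what changed: The per-mask lazy-heap Dijkstra (heapq with stale-entry skipping) is replaced by an array-based Dijkstra: a visited array and, per round, a linear scan for the unvisited node of minimum distance, which is then settled and its edges relaxed; the mask DP and submask merge are unchanged.
-- outside the precondition, e.g. on tree_steiner_tree([[(1, 0), (2, 5)], [(3, -1)], [(1, -10)], []], [0]): A returns -6, B returns -5; on tree_steiner_tree([[]], [-1]): A returns 0, B returns 0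
import Mathlib
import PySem

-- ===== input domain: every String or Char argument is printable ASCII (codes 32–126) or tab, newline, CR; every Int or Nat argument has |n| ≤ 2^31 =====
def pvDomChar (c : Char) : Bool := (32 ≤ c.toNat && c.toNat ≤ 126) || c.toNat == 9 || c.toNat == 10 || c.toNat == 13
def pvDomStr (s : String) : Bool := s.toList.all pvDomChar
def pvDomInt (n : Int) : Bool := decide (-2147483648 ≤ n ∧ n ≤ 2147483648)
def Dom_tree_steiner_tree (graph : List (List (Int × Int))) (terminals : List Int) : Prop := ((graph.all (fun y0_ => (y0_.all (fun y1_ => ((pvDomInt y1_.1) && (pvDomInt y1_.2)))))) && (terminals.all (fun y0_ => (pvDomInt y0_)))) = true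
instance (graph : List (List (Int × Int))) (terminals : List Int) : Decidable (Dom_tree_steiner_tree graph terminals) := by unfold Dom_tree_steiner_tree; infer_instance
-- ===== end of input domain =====

-- B replaces the per-mask lazy-heap Dijkstra of A by an array-based Dijkstra
-- (visited flags + linear min scan); mask DP and submask merge are unchanged (objective: alternative).


-- ===== PORT A =====
-- shared constant INF = 10**9
def pvInf : Int := 1000000000

-- the descending submask chain 'submask = (mask-1)&mask; while submask > 0: …; submask = (submask-1)&mask'
def pvSubChain (mask : Nat) : Nat → List Nat
  | 0 => []
  | s+1 => (s+1) :: pvSubChain mask (s &&& mask)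
decreasing_by exact Nat.lt_succ_of_le (Nat.and_le_left)

-- dp[mask][u] = min(dp[mask][u], dp[sub][u] + dp[mask^sub][u]) over the submask chain
def pvMergeAt (dp : List (List Int)) (mask u : Nat) (start : Int) : Int :=
  (pvSubChain mask ((mask - 1) &&& mask)).foldl
    (fun acc s => min acc ((dp.getD s []).getD u 0 + (dp.getD (mask ^^^ s) []).getD u 0)) start

-- the 'for u in range(n)' merge loop (identical lines in A and in B)
def pvMergeRow (dp : List (List Int)) (mask : Nat) (row : List Int) : List Int :=
  (List.range row.length).foldl (fun r u => r.set u (pvMergeAt dp mask u (r.getD u 0))) row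

-- dp initialisation: dp = [[INF]*n …]; dp[1<<i][terminal] = 0  (terminal.toNat exact on Pre_: 0 ≤ t < n)
def pvInitDp (n k : Nat) (terminals : List Int) : List (List Int) :=
  (List.zip (List.range k) terminals).foldl
    (fun dp it => dp.set (1 <<< it.1) ((dp.getD (1 <<< it.1) []).set it.2.toNat 0))
    (List.replicate (1 <<< k) (List.replicate n pvInf))

-- heapq pops the lexicographically smallest (dist, u) tuple; the heap is modelled as a multiset (list)
def pvLexLt (a b : Int × Nat) : Bool := a.1 < b.1 || (a.1 == b.1 && decide (a.2 < b.2))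

def pvPopMin (p : Int × Nat) (rest : List (Int × Nat)) : Int × Nat :=
  rest.foldl (fun m x => if pvLexLt x m then x else m) p

-- 'for v, weight in graph[u]: …' relaxation, pushing improved nodes (v.toNat exact on Pre_)
def pvRelaxA (g : List (List (Int × Int))) (c : Int) (u : Nat)
    (st : List (Int × Nat) × List Int) : List (Int × Nat) × List Int :=
  (g.getD u []).foldl
    (fun st e =>
      if c + e.2 < st.2.getD e.1.toNat 0 then
        (st.1 ++ [(c + e.2, e.1.toNat)], st.2.set e.1.toNat (c + e.2))
      else st) st

-- 'while pq: …' with fuel; the fuel below is proven sufficient on Pre_ (a totality guard only)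
def pvHeapLoop (g : List (List (Int × Int))) : Nat → List (Int × Nat) → List Int → List Int
  | 0, _, d => d
  | _+1, [], d => d
  | fuel+1, p :: rest, d =>
    let m := pvPopMin p rest
    let pq' := (p :: rest).erase m
    if m.1 > d.getD m.2 0 then pvHeapLoop g fuel pq' d
    else
      let st := pvRelaxA g m.1 m.2 (pq', d)
      pvHeapLoop g fuel st.1 st.2

def pvSumT (d : List Int) : Nat := (d.map Int.toNat).sum

-- initial pushes 'if dp[mask][u] < INF: heappush(pq, (dp[mask][u], u))' then the pop loop
def pvHeapPhase (g : List (List (Int × Int))) (d : List Int) : List Int :=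
  let pq := (List.range d.length).foldl
    (fun pq u => if d.getD u 0 < pvInf then pq ++ [(d.getD u 0, u)] else pq) []
  pvHeapLoop g (pq.length + 2 * pvSumT d + 1) pq d

def tree_steiner_tree (graph : List (List (Int × Int))) (terminals : List Int) : Int :=
  let n := graph.length
  let k := terminals.length
  let dp0 := pvInitDp n k terminals
  let dp := (List.range' 1 (1 <<< k - 1)).foldl
    (fun dp mask => dp.set mask (pvHeapPhase graph (pvMergeRow dp mask (dp.getD mask [])))) dp0
  ((dp.getD (1 <<< k - 1) []).min?).getD 0   -- min(dp[(1<<k)-1]); nonempty on Pre_ (n ≥ 1)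

-- ===== PORT B =====
-- linear scan: best = -1; for u in range(n): if not visited[u] and row[u] < INF and (best < 0 or row[u] < row[best]): best = u
def pvFindBest (visited : List Bool) (d : List Int) : Int :=
  (List.range d.length).foldl
    (fun best u =>
      if visited.getD u true = false ∧ d.getD u 0 < pvInf ∧
         (best < 0 ∨ d.getD u 0 < d.getD best.toNat 0) then (u : Int) else best)
    (-1)

-- 'for v, w in graph[best]: if du + w < row[v]: row[v] = du + w'
def pvRelaxB (g : List (List (Int × Int))) (du : Int) (b : Nat) (d : List Int) : List Int :=
  (g.getD b []).foldl
    (fun d e => if du + e.2 < d.getD e.1.toNat 0 then d.set e.1.toNat (du + e.2) else d) d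

-- 'for _ in range(n): … if best < 0: break; visited[best] = True; relax'
def pvArrLoop (g : List (List (Int × Int))) : Nat → List Bool → List Int → List Int
  | 0, _, d => d
  | r+1, visited, d =>
    let best := pvFindBest visited d
    if best < 0 then d
    else pvArrLoop g r (visited.set best.toNat true) (pvRelaxB g (d.getD best.toNat 0) best.toNat d)

def pvArrayPhase (g : List (List (Int × Int))) (d : List Int) : List Int :=
  pvArrLoop g d.length (List.replicate d.length false) d

def tree_steiner_tree_alt (graph : List (List (Int × Int))) (terminals : List Int) : Int :=
  let n := graph.length
  let k := terminals.length
  let dp0 := pvInitDp n k terminals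
  let dp := (List.range' 1 (1 <<< k - 1)).foldl
    (fun dp mask => dp.set mask (pvArrayPhase graph (pvMergeRow dp mask (dp.getD mask [])))) dp0
  ((dp.getD (1 <<< k - 1) []).min?).getD 0

-- ===== PRECONDITION & SPEC =====
-- Pre_ restricts to the natural Steiner-tree domain: a nonempty graph and, when there are
-- terminals at all (with no terminals the DP never runs and the graph is unconstrained),
-- terminals and edge endpoints in [0, n) and non-negative edge weights.  It excludes inputs on
-- which A raises (n = 0, or an index ≥ n reached) and inputs on which A returns only via
-- negative-index wraparound or via Dijkstra run on negative weights, where both variants'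
-- values are accidental.
def Pre_tree_steiner_tree (graph : List (List (Int × Int))) (terminals : List Int) : Prop :=
  0 < graph.length ∧
  (terminals = [] ∨
    ((∀ t ∈ terminals, 0 ≤ t ∧ t < (graph.length : Int)) ∧
     (∀ r ∈ graph, ∀ e ∈ r, 0 ≤ e.1 ∧ e.1 < (graph.length : Int) ∧ 0 ≤ e.2)))

instance (graph : List (List (Int × Int))) (terminals : List Int) : Decidable (Pre_tree_steiner_tree graph terminals) := by
  unfold Pre_tree_steiner_tree; infer_instance

def pvWitness_tree_steiner_tree : (List (List (Int × Int))) × List Int :=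
  ([[(1, 2)], [(0, 2)]], [0, 1])

def Spec_tree_steiner_tree (graph : List (List (Int × Int))) (terminals : List Int) (out : Int) : Prop := out = tree_steiner_tree_alt graph terminals
instance (graph : List (List (Int × Int))) (terminals : List Int) (out : Int) : Decidable (Spec_tree_steiner_tree graph terminals out) := by unfold Spec_tree_steiner_tree; infer_instance

-- ===== CLAIM (what is proved, stated in full; the proofs are below) =====
def Claim_equal_tree_steiner_tree : Prop := ∀ (graph : List (List (Int × Int))) (terminals : List Int), Dom_tree_steiner_tree graph terminals → Pre_tree_steiner_tree graph terminals → Spec_tree_steiner_tree graph terminals (tree_steiner_tree graph terminals)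

-- ===== LEMMAS AND PROOFS =====

-- basic getD/set helpers specialised to our states
theorem pv_getD_set_self {α : Type} (d : List α) (v : Nat) (a x : α) (h : v < d.length) :
    (d.set v a).getD v x = a := by
  simp [List.getD_eq_getElem?_getD, h]

theorem pv_getD_set_ne {α : Type} (d : List α) (u v : Nat) (a x : α) (h : u ≠ v) :
    (d.set u a).getD v x = d.getD v x := by
  simp [List.getD_eq_getElem?_getD, List.getElem?_set_ne h]

theorem pv_getD_default_irrel {α : Type} (l : List α) (u : Nat) (a b : α) (h : u < l.length) :
    l.getD u a = l.getD u b := by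
  rw [List.getD_eq_getElem _ _ h, List.getD_eq_getElem _ _ h]

-- edge goodness: endpoints in range, non-negative weights
def pvGood (n : Nat) (g : List (List (Int × Int))) : Prop :=
  ∀ r ∈ g, ∀ e ∈ r, 0 ≤ e.1 ∧ e.1.toNat < n ∧ 0 ≤ e.2

theorem pvGood_getD {n : Nat} {g : List (List (Int × Int))} (hg : pvGood n g) (u : Nat) :
    ∀ e ∈ g.getD u [], 0 ≤ e.1 ∧ e.1.toNat < n ∧ 0 ≤ e.2 := by
  intro e he
  by_cases hu : u < g.length
  · rw [List.getD_eq_getElem _ _ hu] at he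
    exact hg _ (List.getElem_mem hu) e he
  · rw [List.getD_eq_default _ _ (Nat.le_of_not_lt hu)] at he
    simp at he

-- a distance value c is realisable at node v by a path from some initial value
inductive pvReach (g : List (List (Int × Int))) (init : List Int) : Int → Nat → Prop
  | base (v : Nat) : v < init.length → pvReach g init (init.getD v 0) v
  | step {c : Int} {u : Nat} (h : pvReach g init c u) {e : Int × Int} (he : e ∈ g.getD u []) :
      pvReach g init (c + e.2) e.1.toNat

-- all edges out of u are relaxed in d
def pvClosed (g : List (List (Int × Int))) (d : List Int) (u : Nat) : Prop :=
  ∀ e ∈ g.getD u [], d.getD e.1.toNat 0 ≤ d.getD u 0 + e.2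

-- the common postcondition of both Dijkstra variants on initial row `init`
def pvPost (g : List (List (Int × Int))) (init d : List Int) : Prop :=
  d.length = init.length ∧
  (∀ v < init.length, d.getD v 0 ≤ init.getD v 0 ∧ 0 ≤ d.getD v 0 ∧
      d.getD v 0 ≤ pvInf ∧ pvReach g init (d.getD v 0) v) ∧
  (∀ u < init.length, pvClosed g d u)

theorem pvReach_lt {g : List (List (Int × Int))} {init : List Int} {n : Nat}
    (hg : pvGood n g) (hn : init.length ≤ n) {c : Int} {v : Nat}
    (h : pvReach g init c v) : v < n := by
  induction h with
  | base v hv => omega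
  | step h he ih => exact (pvGood_getD hg _ _ he).2.1

theorem pv_le_of_reach {g : List (List (Int × Int))} {init d : List Int}
    (hg : pvGood init.length g)
    (hst : ∀ u < init.length, pvClosed g d u)
    (hle : ∀ v < init.length, d.getD v 0 ≤ init.getD v 0)
    {c : Int} {v : Nat} (h : pvReach g init c v) : d.getD v 0 ≤ c := by
  induction h with
  | base v hv => exact hle v hv
  | step h he ih =>
    have hu := pvReach_lt hg (le_refl _) h
    exact le_trans (hst _ hu _ he) (by linarith)

theorem pvPost_unique {g : List (List (Int × Int))} {init d1 d2 : List Int}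
    (hg : pvGood init.length g)
    (h1 : pvPost g init d1) (h2 : pvPost g init d2) : d1 = d2 := by
  obtain ⟨hl1, hb1, hs1⟩ := h1
  obtain ⟨hl2, hb2, hs2⟩ := h2
  apply List.ext_getElem (by omega)
  intro v hv1 hv2
  have hv : v < init.length := by omega
  have e12 : d1.getD v 0 ≤ d2.getD v 0 :=
    pv_le_of_reach hg hs1 (fun v hv => (hb1 v hv).1) (hb2 v hv).2.2.2
  have e21 : d2.getD v 0 ≤ d1.getD v 0 :=
    pv_le_of_reach hg hs2 (fun v hv => (hb2 v hv).1) (hb1 v hv).2.2.2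
  have g1 : d1.getD v 0 = d1[v] := List.getD_eq_getElem _ _ hv1
  have g2 : d2.getD v 0 = d2[v] := List.getD_eq_getElem _ _ hv2
  omega



theorem pvSumT_set (d : List Int) (v : Nat) (a : Int) (hv : v < d.length) :
    pvSumT (d.set v a) + (d.getD v 0).toNat = pvSumT d + a.toNat := by
  induction d generalizing v with
  | nil => simp at hv
  | cons x d ih =>
    cases v with
    | zero => simp [pvSumT, List.set]; omega
    | succ v =>
      have := ih v (by simpa using hv)
      simp only [pvSumT, List.set, List.map, List.sum_cons, List.getD_cons_succ] at this ⊢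
      omega

-- one relaxation pass of A's heap Dijkstra, fully characterised
theorem pvRelaxA_fold (g : List (List (Int × Int))) (init : List Int) (c : Int) (u : Nat)
    (hgood : pvGood init.length g) (hrc : pvReach g init c u) (hc0 : 0 ≤ c) :
    ∀ (es : List (Int × Int)) (pq : List (Int × Nat)) (d : List Int),
    (∀ e ∈ es, e ∈ g.getD u []) →
    d.length = init.length →
    (∀ v < init.length, d.getD v 0 ≤ init.getD v 0 ∧ 0 ≤ d.getD v 0 ∧
        d.getD v 0 ≤ pvInf ∧ pvReach g init (d.getD v 0) v) →
    d.getD u 0 ≤ c →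
    (let st := List.foldl (fun (st : List (Int × Nat) × List Int) (e : Int × Int) =>
        if c + e.2 < st.2.getD e.1.toNat 0 then
          (st.1 ++ [(c + e.2, e.1.toNat)], st.2.set e.1.toNat (c + e.2))
        else st) (pq, d) es
     st.2.length = init.length ∧
     (∀ i : Nat, st.2.getD i 0 ≤ d.getD i 0) ∧
     (∀ v < init.length, st.2.getD v 0 ≤ init.getD v 0 ∧ 0 ≤ st.2.getD v 0 ∧
        st.2.getD v 0 ≤ pvInf ∧ pvReach g init (st.2.getD v 0) v) ∧
     (∀ q ∈ pq, q ∈ st.1) ∧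
     ((∀ q ∈ pq, q.2 < init.length ∧ d.getD q.2 0 ≤ q.1) →
        ∀ q ∈ st.1, q.2 < init.length ∧ st.2.getD q.2 0 ≤ q.1) ∧
     (∀ x : Nat, ((d.getD x 0, x) ∈ pq ∨ pvClosed g d x) →
        ((st.2.getD x 0, x) ∈ st.1 ∨ pvClosed g st.2 x)) ∧
     st.2.getD u 0 = d.getD u 0 ∧
     (∀ e ∈ es, st.2.getD e.1.toNat 0 ≤ c + e.2) ∧
     st.1.length + 2 * pvSumT st.2 ≤ pq.length + 2 * pvSumT d) := by
  intro es
  induction es with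
  | nil =>
    intro pq d hes hlen hbnd hcu
    exact ⟨hlen, fun i => le_refl _, hbnd, fun q hq => hq, fun h => h, fun x h => h,
      rfl, by simp, le_refl _⟩
  | cons e es ih =>
    intro pq d hes hlen hbnd hcu
    simp only [List.foldl_cons]
    by_cases hlt : c + e.2 < d.getD e.1.toNat 0
    · -- update step
      rw [if_pos hlt]
      have hge := pvGood_getD hgood u e (hes e List.mem_cons_self)
      have hvlt : e.1.toNat < init.length := hge.2.1
      have hw0 : 0 ≤ e.2 := hge.2.2
      have hvd : e.1.toNat < d.length := by omega
      have huv : u ≠ e.1.toNat := by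
        intro h; rw [← h] at hlt; omega
      -- the one-step state
      have hstep2 : ∀ i : Nat, (d.set e.1.toNat (c + e.2)).getD i 0 ≤ d.getD i 0 := by
        intro i
        by_cases hi : e.1.toNat = i
        · rw [← hi, pv_getD_set_self _ _ _ _ hvd]; omega
        · rw [pv_getD_set_ne _ _ _ _ _ hi]
      have hself : (d.set e.1.toNat (c + e.2)).getD e.1.toNat 0 = c + e.2 :=
        pv_getD_set_self _ _ _ _ hvd
      have hbnd1 : ∀ v < init.length,
          (d.set e.1.toNat (c + e.2)).getD v 0 ≤ init.getD v 0 ∧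
          0 ≤ (d.set e.1.toNat (c + e.2)).getD v 0 ∧
          (d.set e.1.toNat (c + e.2)).getD v 0 ≤ pvInf ∧
          pvReach g init ((d.set e.1.toNat (c + e.2)).getD v 0) v := by
        intro v hv
        by_cases hi : e.1.toNat = v
        · subst hi
          rw [hself]
          have hb := hbnd _ hvlt
          exact ⟨by omega, by omega, by omega, pvReach.step hrc (hes e List.mem_cons_self)⟩
        · rw [pv_getD_set_ne _ _ _ _ _ hi]; exact hbnd v hv
      have h1 := ih (pq ++ [(c + e.2, e.1.toNat)]) (d.set e.1.toNat (c + e.2))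
        (fun e' he' => hes e' (List.mem_cons_of_mem _ he'))
        (by simp [hlen])
        hbnd1
        (by rw [pv_getD_set_ne _ _ _ _ _ (fun h => huv h.symm)]; exact hcu)
      obtain ⟨B1, B2, B3, B4, B5, B6, B7, B8, B9⟩ := h1
      refine ⟨B1, ?_, B3, ?_, ?_, ?_, ?_, ?_, ?_⟩
      · intro i; exact le_trans (B2 i) (hstep2 i)
      · intro q hq; exact B4 q (List.mem_append_left _ hq)
      · intro hpre q hq
        refine B5 ?_ q hq
        intro q' hq'
        rcases List.mem_append.1 hq' with h | h
        · exact ⟨(hpre q' h).1, le_trans (hstep2 _) (hpre q' h).2⟩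
        · simp at h; subst h
          exact ⟨hvlt, by rw [hself]⟩
      · intro x hx
        refine B6 x ?_
        by_cases hi : e.1.toNat = x
        · subst hi
          left; rw [hself]; exact List.mem_append_right _ List.mem_cons_self
        · rw [pv_getD_set_ne _ _ _ _ _ hi]
          rcases hx with h | h
          · left; exact List.mem_append_left _ h
          · right
            intro e' he'
            rw [pv_getD_set_ne _ _ _ _ _ hi]
            exact le_trans (hstep2 _) (h e' he')
      · rw [B7, pv_getD_set_ne _ _ _ _ _ (fun h => huv h.symm)]
      · intro e' he'
        rcases List.mem_cons.1 he' with h | h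
        · subst h
          exact le_trans (B2 _) (by rw [hself])
        · exact B8 e' h
      · refine le_trans B9 ?_
        have hs := pvSumT_set d e.1.toNat (c + e.2) hvd
        have hto : (c + e.2).toNat + 1 ≤ (d.getD e.1.toNat 0).toNat := by omega
        simp only [List.length_append, List.length_cons, List.length_nil]
        omega
    · -- no-update step
      rw [if_neg hlt]
      have h1 := ih pq d (fun e' he' => hes e' (List.mem_cons_of_mem _ he')) hlen hbnd hcu
      obtain ⟨B1, B2, B3, B4, B5, B6, B7, B8, B9⟩ := h1
      refine ⟨B1, B2, B3, B4, B5, B6, B7, ?_, B9⟩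
      intro e' he'
      rcases List.mem_cons.1 he' with h | h
      · subst h; exact le_trans (B2 _) (by omega)
      · exact B8 e' h


theorem pvPopMin_mem (p : Int × Nat) (rest : List (Int × Nat)) : pvPopMin p rest ∈ p :: rest := by
  induction rest generalizing p with
  | nil => simp [pvPopMin]
  | cons x rest ih =>
    simp only [pvPopMin, List.foldl_cons]
    by_cases h : pvLexLt x p
    · rw [if_pos h]
      show pvPopMin x rest ∈ p :: x :: rest
      exact List.mem_cons_of_mem _ (ih x)
    · rw [if_neg h]
      show pvPopMin p rest ∈ p :: x :: rest
      rcases List.mem_cons.1 (ih p) with h1 | h1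
      · rw [h1]; exact List.mem_cons_self
      · exact List.mem_cons_of_mem _ (List.mem_cons_of_mem _ h1)

theorem pvHeapLoop_succ_nil (g : List (List (Int × Int))) (fuel : Nat) (d : List Int) :
    pvHeapLoop g (fuel+1) [] d = d := rfl

theorem pvHeapLoop_succ_cons (g : List (List (Int × Int))) (fuel : Nat)
    (p : Int × Nat) (rest : List (Int × Nat)) (d : List Int) :
    pvHeapLoop g (fuel+1) (p :: rest) d =
      (if (pvPopMin p rest).1 > d.getD (pvPopMin p rest).2 0 then
        pvHeapLoop g fuel ((p :: rest).erase (pvPopMin p rest)) d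
      else
        pvHeapLoop g fuel
          (pvRelaxA g (pvPopMin p rest).1 (pvPopMin p rest).2 ((p :: rest).erase (pvPopMin p rest), d)).1
          (pvRelaxA g (pvPopMin p rest).1 (pvPopMin p rest).2 ((p :: rest).erase (pvPopMin p rest), d)).2) := rfl

theorem pvHeapLoop_post (g : List (List (Int × Int))) (init : List Int)
    (hgood : pvGood init.length g) :
    ∀ (fuel : Nat) (pq : List (Int × Nat)) (d : List Int),
    d.length = init.length →
    (∀ v < init.length, d.getD v 0 ≤ init.getD v 0 ∧ 0 ≤ d.getD v 0 ∧
        d.getD v 0 ≤ pvInf ∧ pvReach g init (d.getD v 0) v) →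
    (∀ q ∈ pq, q.2 < init.length ∧ d.getD q.2 0 ≤ q.1) →
    (∀ u < init.length, (d.getD u 0, u) ∈ pq ∨ pvClosed g d u) →
    pq.length + 2 * pvSumT d < fuel →
    pvPost g init (pvHeapLoop g fuel pq d) := by
  intro fuel
  induction fuel with
  | zero => intro pq d _ _ _ _ hm; exact absurd hm (Nat.not_lt_zero _)
  | succ fuel ih =>
    intro pq d hlen hbnd hq hopen hm
    cases pq with
    | nil =>
      rw [pvHeapLoop_succ_nil]
      exact ⟨hlen, hbnd, fun u hu => (hopen u hu).resolve_left (by simp)⟩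
    | cons p rest =>
      rw [pvHeapLoop_succ_cons]
      have hmm : pvPopMin p rest ∈ p :: rest := pvPopMin_mem p rest
      have hlenE : ((p :: rest).erase (pvPopMin p rest)).length = rest.length := by
        rw [List.length_erase_of_mem hmm]; rfl
      have hsubE : ∀ q ∈ (p :: rest).erase (pvPopMin p rest), q ∈ p :: rest :=
        fun q h => List.mem_of_mem_erase h
      by_cases hgt : (pvPopMin p rest).1 > d.getD (pvPopMin p rest).2 0
      · rw [if_pos hgt]
        refine ih _ d hlen hbnd (fun q hq' => hq q (hsubE q hq')) ?_ ?_
        · intro u hu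
          rcases hopen u hu with h | h
          · left
            refine (List.mem_erase_of_ne ?_).2 h
            intro he
            rw [← he] at hgt
            simp at hgt
          · right; exact h
        · simp only [List.length_cons] at hm; omega
      · rw [if_neg hgt]
        have hque := hq _ hmm
        have hc : d.getD (pvPopMin p rest).2 0 = (pvPopMin p rest).1 :=
          le_antisymm hque.2 (by omega)
        have hrc : pvReach g init (pvPopMin p rest).1 (pvPopMin p rest).2 :=
          hc ▸ (hbnd _ hque.1).2.2.2
        have hc0 : (0:Int) ≤ (pvPopMin p rest).1 := by
          have := (hbnd _ hque.1).2.1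
          omega
        have hrel := pvRelaxA_fold g init (pvPopMin p rest).1 (pvPopMin p rest).2 hgood hrc hc0
          (g.getD (pvPopMin p rest).2 []) ((p :: rest).erase (pvPopMin p rest)) d
          (fun e he => he) hlen hbnd (le_of_eq hc)
        simp only at hrel
        obtain ⟨B1, B2, B3, B4, B5, B6, B7, B8, B9⟩ := hrel
        have hreleq : pvRelaxA g (pvPopMin p rest).1 (pvPopMin p rest).2
            ((p :: rest).erase (pvPopMin p rest), d) =
            List.foldl (fun (st : List (Int × Nat) × List Int) (e : Int × Int) =>
              if (pvPopMin p rest).1 + e.2 < st.2.getD e.1.toNat 0 then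
                (st.1 ++ [((pvPopMin p rest).1 + e.2, e.1.toNat)],
                  st.2.set e.1.toNat ((pvPopMin p rest).1 + e.2))
              else st) (((p :: rest).erase (pvPopMin p rest)), d)
              (g.getD (pvPopMin p rest).2 []) := rfl
        rw [← hreleq] at B1 B2 B3 B4 B5 B6 B7 B8 B9
        refine ih _ _ B1 B3 ?_ ?_ ?_
        · exact B5 (fun q hq' => ⟨(hq q (hsubE q hq')).1,
            (hq q (hsubE q hq')).2⟩)
        · intro u hu
          by_cases huu : u = (pvPopMin p rest).2
          · subst huu
            right
            intro e he
            have := B8 e he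
            rw [B7, hc]
            exact this
          · refine B6 u ?_
            rcases hopen u hu with h | h
            · left
              refine (List.mem_erase_of_ne ?_).2 h
              intro he
              exact huu (congrArg Prod.snd he)
            · right; exact h
        · simp only [List.length_cons] at hm
          omega

-- the initial heap contains exactly the finite entries
theorem pvHeapPhase_post (g : List (List (Int × Int))) (d : List Int)
    (hgood : pvGood d.length g)
    (hok : ∀ v < d.length, 0 ≤ d.getD v 0 ∧ d.getD v 0 ≤ pvInf) :
    pvPost g d (pvHeapPhase g d) := by
  show pvPost g d (pvHeapLoop g _ _ d)
  have hconv : (List.range d.length).foldl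
      (fun (pq : List (Int × Nat)) (u : Nat) =>
        if d.getD u 0 < pvInf then pq ++ [(d.getD u 0, u)] else pq) [] =
      List.map (fun u => (d.getD u 0, u))
        ((List.range d.length).filter (fun u => decide (d.getD u 0 < pvInf))) := by
    rw [show (fun (pq : List (Int × Nat)) (u : Nat) =>
        if d.getD u 0 < pvInf then pq ++ [(d.getD u 0, u)] else pq) =
        (fun (pq : List (Int × Nat)) (u : Nat) =>
          if (fun u => decide (d.getD u 0 < pvInf)) u = true then
            pq ++ [(fun (u : Nat) => (d.getD u 0, u)) u] else pq) from by
      funext pq u; simp]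
    rw [PySem.List.foldl_append_if]
    simp
  rw [hconv]
  refine pvHeapLoop_post g d (by simpa using hgood) _ _ d rfl ?_ ?_ ?_ ?_
  · intro v hv
    exact ⟨le_refl _, (hok v hv).1, (hok v hv).2, pvReach.base v hv⟩
  · intro q hq
    obtain ⟨u, hu, hqe⟩ := List.mem_map.1 hq
    have := List.mem_filter.1 hu
    subst hqe
    exact ⟨List.mem_range.1 this.1, le_refl _⟩
  · intro u hu
    by_cases hfin : d.getD u 0 < pvInf
    · left
      exact List.mem_map.2 ⟨u, List.mem_filter.2 ⟨List.mem_range.2 hu, by simpa using hfin⟩, rfl⟩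
    · right
      intro e he
      have hge := pvGood_getD hgood u e he
      have h1 : d.getD e.1.toNat 0 ≤ pvInf := (hok _ hge.2.1).2
      have h2 : d.getD u 0 = pvInf := le_antisymm (hok u hu).2 (by omega)
      have h3 : (0:Int) ≤ e.2 := hge.2.2
      omega
  · omega


-- specification of the linear min scan
theorem pvFindBest_aux (visited : List Bool) (d : List Int) :
    ∀ m : Nat,
    (((List.range m).foldl (fun (best : Int) (u : Nat) =>
        if visited.getD u true = false ∧ d.getD u 0 < pvInf ∧
           (best < 0 ∨ d.getD u 0 < d.getD best.toNat 0) then (u : Int) else best) (-1)) = -1 ∧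
      (∀ u < m, visited.getD u true = false → ¬(d.getD u 0 < pvInf))) ∨
    (∃ b : Nat, ((List.range m).foldl (fun (best : Int) (u : Nat) =>
        if visited.getD u true = false ∧ d.getD u 0 < pvInf ∧
           (best < 0 ∨ d.getD u 0 < d.getD best.toNat 0) then (u : Int) else best) (-1)) = (b : Int) ∧
      b < m ∧ visited.getD b true = false ∧ d.getD b 0 < pvInf ∧
      (∀ u < m, visited.getD u true = false → d.getD u 0 < pvInf → d.getD b 0 ≤ d.getD u 0)) := by
  intro m
  induction m with
  | zero => left; exact ⟨rfl, by omega⟩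
  | succ m ih =>
    rw [List.range_succ, List.foldl_append, List.foldl_cons, List.foldl_nil]
    rcases ih with ⟨hacc, hnone⟩ | ⟨b, hacc, hbm, hbv, hbf, hbmin⟩
    · rw [hacc]
      by_cases hc : visited.getD m true = false ∧ d.getD m 0 < pvInf ∧
          ((-1 : Int) < 0 ∨ d.getD m 0 < d.getD (-1 : Int).toNat 0)
      · rw [if_pos hc]
        right
        refine ⟨m, rfl, Nat.lt_succ_self m, hc.1, hc.2.1, ?_⟩
        intro u hu huv huf
        rcases Nat.lt_succ_iff_lt_or_eq.1 hu with h | h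
        · exact absurd huf (hnone u h huv)
        · subst h; exact le_refl _
      · rw [if_neg hc]
        left
        refine ⟨rfl, ?_⟩
        intro u hu huv
        rcases Nat.lt_succ_iff_lt_or_eq.1 hu with h | h
        · exact hnone u h huv
        · subst h
          intro hf
          exact hc ⟨huv, hf, Or.inl (by norm_num)⟩
    · rw [hacc]
      by_cases hc : visited.getD m true = false ∧ d.getD m 0 < pvInf ∧
          ((b : Int) < 0 ∨ d.getD m 0 < d.getD ((b : Int)).toNat 0)
      · rw [if_pos hc]
        right
        refine ⟨m, rfl, Nat.lt_succ_self m, hc.1, hc.2.1, ?_⟩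
        intro u hu huv huf
        rcases Nat.lt_succ_iff_lt_or_eq.1 hu with h | h
        · have hmb : d.getD m 0 < d.getD b 0 := by
            rcases hc.2.2 with h' | h'
            · exact absurd h' (by simp)
            · simpa using h'
          exact le_trans (le_of_lt hmb) (hbmin u h huv huf)
        · subst h; exact le_refl _
      · rw [if_neg hc]
        right
        refine ⟨b, rfl, Nat.lt_succ_of_lt hbm, hbv, hbf, ?_⟩
        intro u hu huv huf
        rcases Nat.lt_succ_iff_lt_or_eq.1 hu with h | h
        · exact hbmin u h huv huf
        · subst h
          by_contra hlt
          exact hc ⟨huv, huf, Or.inr (by rw [Int.toNat_natCast]; omega)⟩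

theorem pvCountFalse_set (visited : List Bool) (b : Nat) (hb : b < visited.length)
    (hf : visited.getD b true = false) :
    (visited.set b true).count false + 1 = visited.count false := by
  induction visited generalizing b with
  | nil => simp at hb
  | cons x t ih =>
    cases b with
    | zero =>
      simp only [List.getD_cons_zero] at hf
      subst hf
      simp
    | succ b =>
      simp only [List.getD_cons_succ] at hf
      have := ih b (by simpa using hb) hf
      simp only [List.set, List.count_cons]
      split_ifs <;> omega

theorem pvCountFalse_zero (visited : List Bool) (h : visited.count false = 0) :
    ∀ u < visited.length, visited.getD u false = true := by
  intro u hu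
  have hmem : visited.getD u false = visited[u] := List.getD_eq_getElem _ _ hu
  have : false ∉ visited := List.count_eq_zero.mp h
  rw [hmem]
  cases hx : visited[u] with
  | true => rfl
  | false => exact absurd (hx ▸ List.getElem_mem hu) this

-- one relaxation pass of B's array Dijkstra, fully characterised
theorem pvRelaxB_fold (g : List (List (Int × Int))) (init : List Int) (du : Int) (b : Nat)
    (hgood : pvGood init.length g) (hrc : pvReach g init du b) (hd0 : 0 ≤ du) :
    ∀ (es : List (Int × Int)) (d : List Int),
    (∀ e ∈ es, e ∈ g.getD b []) →
    d.length = init.length →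
    (∀ v < init.length, d.getD v 0 ≤ init.getD v 0 ∧ 0 ≤ d.getD v 0 ∧
        d.getD v 0 ≤ pvInf ∧ pvReach g init (d.getD v 0) v) →
    (let d' := es.foldl (fun (d : List Int) (e : Int × Int) =>
        if du + e.2 < d.getD e.1.toNat 0 then d.set e.1.toNat (du + e.2) else d) d
     d'.length = init.length ∧
     (∀ i : Nat, d'.getD i 0 ≤ d.getD i 0) ∧
     (∀ v < init.length, d'.getD v 0 ≤ init.getD v 0 ∧ 0 ≤ d'.getD v 0 ∧
        d'.getD v 0 ≤ pvInf ∧ pvReach g init (d'.getD v 0) v) ∧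
     (∀ e ∈ es, d'.getD e.1.toNat 0 ≤ du + e.2) ∧
     (∀ v : Nat, d.getD v 0 ≤ du → d'.getD v 0 = d.getD v 0) ∧
     (∀ v : Nat, d'.getD v 0 = d.getD v 0 ∨ du ≤ d'.getD v 0)) := by
  intro es
  induction es with
  | nil =>
    intro d hes hlen hbnd
    exact ⟨hlen, fun i => le_refl _, hbnd, by simp, fun v _ => rfl, fun v => Or.inl rfl⟩
  | cons e es ih =>
    intro d hes hlen hbnd
    simp only [List.foldl_cons]
    by_cases hlt : du + e.2 < d.getD e.1.toNat 0
    · rw [if_pos hlt]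
      have hge := pvGood_getD hgood b e (hes e List.mem_cons_self)
      have hvlt : e.1.toNat < init.length := hge.2.1
      have hw0 : 0 ≤ e.2 := hge.2.2
      have hvd : e.1.toNat < d.length := by omega
      have hself : (d.set e.1.toNat (du + e.2)).getD e.1.toNat 0 = du + e.2 :=
        pv_getD_set_self _ _ _ _ hvd
      have hstep2 : ∀ i : Nat, (d.set e.1.toNat (du + e.2)).getD i 0 ≤ d.getD i 0 := by
        intro i
        by_cases hi : e.1.toNat = i
        · rw [← hi, hself]; omega
        · rw [pv_getD_set_ne _ _ _ _ _ hi]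
      have hbnd1 : ∀ v < init.length,
          (d.set e.1.toNat (du + e.2)).getD v 0 ≤ init.getD v 0 ∧
          0 ≤ (d.set e.1.toNat (du + e.2)).getD v 0 ∧
          (d.set e.1.toNat (du + e.2)).getD v 0 ≤ pvInf ∧
          pvReach g init ((d.set e.1.toNat (du + e.2)).getD v 0) v := by
        intro v hv
        by_cases hi : e.1.toNat = v
        · subst hi
          rw [hself]
          have hb := hbnd _ hvlt
          exact ⟨by omega, by omega, by omega, pvReach.step hrc (hes e List.mem_cons_self)⟩
        · rw [pv_getD_set_ne _ _ _ _ _ hi]; exact hbnd v hv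
      have h1 := ih (d.set e.1.toNat (du + e.2))
        (fun e' he' => hes e' (List.mem_cons_of_mem _ he'))
        (by simp [hlen]) hbnd1
      obtain ⟨B1, B2, B3, B4, B5, B6⟩ := h1
      refine ⟨B1, ?_, B3, ?_, ?_, ?_⟩
      · intro i; exact le_trans (B2 i) (hstep2 i)
      · intro e' he'
        rcases List.mem_cons.1 he' with h | h
        · subst h; exact le_trans (B2 _) (le_of_eq hself)
        · exact B4 e' h
      · intro v hv
        have hne : e.1.toNat ≠ v := by
          intro h; rw [h] at hlt; omega
        rw [B5 v (by rw [pv_getD_set_ne _ _ _ _ _ hne]; exact hv),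
          pv_getD_set_ne _ _ _ _ _ hne]
      · intro v
        rcases B6 v with h | h
        · by_cases hi : e.1.toNat = v
          · right; rw [h, ← hi, hself]; omega
          · left; rw [h, pv_getD_set_ne _ _ _ _ _ hi]
        · right; exact h
    · rw [if_neg hlt]
      have h1 := ih d (fun e' he' => hes e' (List.mem_cons_of_mem _ he')) hlen hbnd
      obtain ⟨B1, B2, B3, B4, B5, B6⟩ := h1
      refine ⟨B1, B2, B3, ?_, B5, B6⟩
      intro e' he'
      rcases List.mem_cons.1 he' with h | h
      · subst h; exact le_trans (B2 _) (by omega)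
      · exact B4 e' h

theorem pvArrLoop_succ (g : List (List (Int × Int))) (r : Nat) (visited : List Bool)
    (d : List Int) :
    pvArrLoop g (r+1) visited d =
      (if pvFindBest visited d < 0 then d
       else pvArrLoop g r (visited.set (pvFindBest visited d).toNat true)
        (pvRelaxB g (d.getD (pvFindBest visited d).toNat 0) (pvFindBest visited d).toNat d)) := rfl

theorem pvArrLoop_post (g : List (List (Int × Int))) (init : List Int)
    (hgood : pvGood init.length g) :
    ∀ (r : Nat) (visited : List Bool) (d : List Int),
    d.length = init.length → visited.length = init.length →
    (∀ v < init.length, d.getD v 0 ≤ init.getD v 0 ∧ 0 ≤ d.getD v 0 ∧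
        d.getD v 0 ≤ pvInf ∧ pvReach g init (d.getD v 0) v) →
    (∀ u < init.length, visited.getD u false = true → pvClosed g d u) →
    (∀ u < init.length, ∀ x < init.length, visited.getD u false = true →
        visited.getD x false = false → d.getD u 0 ≤ d.getD x 0) →
    visited.count false ≤ r →
    pvPost g init (pvArrLoop g r visited d) := by
  intro r
  induction r with
  | zero =>
    intro visited d hlen hlenv hbnd hcl _ hcnt
    have hall := pvCountFalse_zero visited (Nat.le_zero.1 hcnt)
    exact ⟨hlen, hbnd, fun u hu => hcl u hu (hall u (by omega))⟩
  | succ r ih =>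
    intro visited d hlen hlenv hbnd hcl hmin hcnt
    rw [pvArrLoop_succ]
    rcases pvFindBest_aux visited d d.length with ⟨hacc, hnone⟩ | ⟨b, hacc, hbm, hbv, hbf, hbmin⟩
    · rw [if_pos (by rw [show pvFindBest visited d = ((List.range d.length).foldl _ (-1)) from rfl, hacc]; norm_num)]
      refine ⟨hlen, hbnd, ?_⟩
      intro u hu
      by_cases hv : visited.getD u false = true
      · exact hcl u hu hv
      · have huf : visited.getD u true = false := by
          rw [pv_getD_default_irrel visited u true false (by omega)]
          exact Bool.not_eq_true _ ▸ (by simpa using hv)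
        have h1 : ¬(d.getD u 0 < pvInf) := hnone u (by omega) huf
        have h2 : d.getD u 0 = pvInf := le_antisymm (hbnd u hu).2.2.1 (by omega)
        intro e he
        have hge := pvGood_getD hgood u e he
        have := (hbnd _ hge.2.1).2.2.1
        have := hge.2.2
        omega
    · have hfb : pvFindBest visited d = (b : Int) := hacc
      rw [if_neg (by rw [hfb]; simp)]
      have hbn : b < init.length := by omega
      have htn : ((b : Int)).toNat = b := Int.toNat_natCast b
      rw [hfb, htn]
      have hbvf : visited.getD b false = false := by
        rw [pv_getD_default_irrel visited b false true (by omega)]; exact hbv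
      have hrc : pvReach g init (d.getD b 0) b := (hbnd b hbn).2.2.2
      have hd0 : 0 ≤ d.getD b 0 := (hbnd b hbn).2.1
      have hrel := pvRelaxB_fold g init (d.getD b 0) b hgood hrc hd0
        (g.getD b []) d (fun e he => he) hlen hbnd
      simp only at hrel
      obtain ⟨B1, B2, B3, B4, B5, B6⟩ := hrel
      have hreleq : pvRelaxB g (d.getD b 0) b d =
          List.foldl (fun (d' : List Int) (e : Int × Int) =>
            if d.getD b 0 + e.2 < d'.getD e.1.toNat 0 then d'.set e.1.toNat (d.getD b 0 + e.2)
            else d') d (g.getD b []) := rfl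
      rw [← hreleq] at B1 B2 B3 B4 B5 B6
      -- du is a lower bound on all unvisited entries
      have hminu : ∀ x < init.length, visited.getD x false = false → d.getD b 0 ≤ d.getD x 0 := by
        intro x hx hxf
        have hxt : visited.getD x true = false := by
          rw [pv_getD_default_irrel visited x true false (by omega)]; exact hxf
        by_cases hfin : d.getD x 0 < pvInf
        · exact hbmin x (by omega) hxt hfin
        · have := (hbnd x hx).2.2.1
          omega
      have hdb : (pvRelaxB g (d.getD b 0) b d).getD b 0 = d.getD b 0 := B5 b (le_refl _)
      refine ih (visited.set b true) _ B1 (by simp [hlenv]) B3 ?_ ?_ ?_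
      · -- closedness of all visited nodes
        intro u hu huv
        by_cases hub : u = b
        · subst hub
          intro e he
          rw [hdb]
          exact B4 e he
        · have huvold : visited.getD u false = true := by
            rwa [pv_getD_set_ne _ _ _ _ _ (fun h => hub h.symm)] at huv
          have hdu : (pvRelaxB g (d.getD b 0) b d).getD u 0 = d.getD u 0 :=
            B5 u (hmin u hu b hbn huvold hbvf)
          intro e he
          rw [hdu]
          exact le_trans (B2 _) (hcl u hu huvold e he)
      · -- settled values are minimal
        intro u hu x hx huv hxv
        have hxb : x ≠ b := by
          intro h
          rw [h, pv_getD_set_self _ _ _ _ (by omega)] at hxv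
          simp at hxv
        have hxvold : visited.getD x false = false := by
          rwa [pv_getD_set_ne _ _ _ _ _ (fun h => hxb h.symm)] at hxv
        have hxlow : d.getD b 0 ≤ (pvRelaxB g (d.getD b 0) b d).getD x 0 := by
          rcases B6 x with h | h
          · rw [h]; exact hminu x hx hxvold
          · exact h
        by_cases hub : u = b
        · subst hub; rw [hdb]; exact hxlow
        · have huvold : visited.getD u false = true := by
            rwa [pv_getD_set_ne _ _ _ _ _ (fun h => hub h.symm)] at huv
          have hdu : (pvRelaxB g (d.getD b 0) b d).getD u 0 = d.getD u 0 :=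
            B5 u (hmin u hu b hbn huvold hbvf)
          rw [hdu]
          exact le_trans (hmin u hu b hbn huvold hbvf) hxlow
      · -- the unvisited count decreases
        have := pvCountFalse_set visited b (by omega) hbv
        omega

theorem pvArrayPhase_post (g : List (List (Int × Int))) (d : List Int)
    (hgood : pvGood d.length g)
    (hok : ∀ v < d.length, 0 ≤ d.getD v 0 ∧ d.getD v 0 ≤ pvInf) :
    pvPost g d (pvArrayPhase g d) := by
  refine pvArrLoop_post g d (by simpa using hgood) d.length
    (List.replicate d.length false) d rfl (by simp) ?_ ?_ ?_ ?_
  · intro v hv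
    exact ⟨le_refl _, (hok v hv).1, (hok v hv).2, pvReach.base v hv⟩
  · intro u hu hvis
    rw [List.getD_eq_getElem _ _ (by simpa using hu)] at hvis
    simp at hvis
  · intro u hu x hx hvis _
    rw [List.getD_eq_getElem _ _ (by simpa using hu)] at hvis
    simp at hvis
  · simp

-- the two Dijkstra variants agree
theorem pvPhase_eq (g : List (List (Int × Int))) (d : List Int)
    (hgood : pvGood d.length g)
    (hok : ∀ v < d.length, 0 ≤ d.getD v 0 ∧ d.getD v 0 ≤ pvInf) :
    pvHeapPhase g d = pvArrayPhase g d :=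
  pvPost_unique hgood (pvHeapPhase_post g d hgood hok) (pvArrayPhase_post g d hgood hok)


-- rows and dp tables with entries in [0, INF]
def pvRowOK (n : Nat) (row : List Int) : Prop :=
  row.length = n ∧ ∀ v < n, 0 ≤ row.getD v 0 ∧ row.getD v 0 ≤ pvInf

def pvDpOK (n : Nat) (dp : List (List Int)) : Prop := ∀ r ∈ dp, pvRowOK n r

theorem pvDp_entry_ok {n : Nat} {dp : List (List Int)} (hdp : pvDpOK n dp) (s u : Nat) :
    0 ≤ (dp.getD s []).getD u 0 ∧ (dp.getD s []).getD u 0 ≤ pvInf := by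
  by_cases hs : s < dp.length
  · rw [List.getD_eq_getElem _ _ hs]
    have hr := hdp _ (List.getElem_mem hs)
    by_cases hu : u < n
    · exact hr.2 u hu
    · rw [List.getD_eq_default _ _ (le_of_eq_of_le hr.1 (by omega))]
      norm_num [pvInf]
  · rw [List.getD_eq_default (l := dp) (n := s) _ (Nat.le_of_not_lt hs)]
    norm_num [pvInf]

theorem pvFoldMin_ok {n : Nat} {dp : List (List Int)} (hdp : pvDpOK n dp) (mask u : Nat) :
    ∀ (L : List Nat) (start : Int), 0 ≤ start → start ≤ pvInf →
    0 ≤ L.foldl (fun acc s => min acc ((dp.getD s []).getD u 0 + (dp.getD (mask ^^^ s) []).getD u 0)) start ∧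
    L.foldl (fun acc s => min acc ((dp.getD s []).getD u 0 + (dp.getD (mask ^^^ s) []).getD u 0)) start ≤ pvInf := by
  intro L
  induction L with
  | nil => intro start h0 h1; exact ⟨h0, h1⟩
  | cons s L ih =>
    intro start h0 h1
    simp only [List.foldl_cons]
    refine ih _ ?_ ?_
    · have ha := pvDp_entry_ok hdp s u
      have hb := pvDp_entry_ok hdp (mask ^^^ s) u
      have hmin := le_min_iff (a := (0:Int)) (b := start)
        (c := (dp.getD s []).getD u 0 + (dp.getD (mask ^^^ s) []).getD u 0)
      omega
    · have := min_le_left start ((dp.getD s []).getD u 0 + (dp.getD (mask ^^^ s) []).getD u 0)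
      omega

theorem pvMergeAt_ok {n : Nat} {dp : List (List Int)} (hdp : pvDpOK n dp)
    (mask u : Nat) (start : Int) (h0 : 0 ≤ start) (h1 : start ≤ pvInf) :
    0 ≤ pvMergeAt dp mask u start ∧ pvMergeAt dp mask u start ≤ pvInf :=
  pvFoldMin_ok hdp mask u _ start h0 h1

theorem pvFoldSet_getD (dp : List (List Int)) (mask : Nat) :
    ∀ (L : List Nat) (r : List Int), (∀ u ∈ L, u < r.length) → L.Nodup →
    (∀ v : Nat, ((L.foldl (fun (r : List Int) u => r.set u (pvMergeAt dp mask u (r.getD u 0))) r).getD v 0)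
      = if v ∈ L then pvMergeAt dp mask v (r.getD v 0) else r.getD v 0) ∧
    (L.foldl (fun (r : List Int) u => r.set u (pvMergeAt dp mask u (r.getD u 0))) r).length = r.length := by
  intro L
  induction L with
  | nil => intro r _ _; exact ⟨fun v => by simp, rfl⟩
  | cons u L ih =>
    intro r hmem hnd
    simp only [List.foldl_cons]
    have hu : u < r.length := hmem u List.mem_cons_self
    have hih := ih (r.set u (pvMergeAt dp mask u (r.getD u 0)))
      (fun x hx => by rw [List.length_set]; exact hmem x (List.mem_cons_of_mem _ hx))
      (List.Nodup.of_cons hnd)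
    refine ⟨?_, by rw [hih.2, List.length_set]⟩
    intro v
    rw [hih.1 v]
    by_cases hvL : v ∈ L
    · rw [if_pos hvL, if_pos (List.mem_cons_of_mem _ hvL)]
      have hvu : u ≠ v := by
        intro h; subst h; exact (List.nodup_cons.1 hnd).1 hvL
      rw [pv_getD_set_ne _ _ _ _ _ hvu]
    · rw [if_neg hvL]
      by_cases hvu : v = u
      · subst hvu
        rw [if_pos List.mem_cons_self, pv_getD_set_self _ _ _ _ hu]
      · rw [if_neg (by simp [hvu, hvL]), pv_getD_set_ne _ _ _ _ _ (fun h => hvu h.symm)]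

theorem pvMergeRow_getD (dp : List (List Int)) (mask : Nat) (row : List Int) (v : Nat)
    (hv : v < row.length) :
    (pvMergeRow dp mask row).getD v 0 = pvMergeAt dp mask v (row.getD v 0) := by
  have h := pvFoldSet_getD dp mask (List.range row.length) row
    (fun _ hx => List.mem_range.1 hx) (List.nodup_range)
  rw [show pvMergeRow dp mask row =
    (List.range row.length).foldl (fun (r : List Int) u => r.set u (pvMergeAt dp mask u (r.getD u 0))) row from rfl]
  rw [h.1 v, if_pos (List.mem_range.2 hv)]

theorem pvMergeRow_length (dp : List (List Int)) (mask : Nat) (row : List Int) :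
    (pvMergeRow dp mask row).length = row.length :=
  (pvFoldSet_getD dp mask (List.range row.length) row
    (fun _ hx => List.mem_range.1 hx) (List.nodup_range)).2

theorem pvMergeRow_ok {n : Nat} {dp : List (List Int)} (hdp : pvDpOK n dp)
    (mask : Nat) {row : List Int} (hr : pvRowOK n row) :
    pvRowOK n (pvMergeRow dp mask row) := by
  obtain ⟨hlen, hb⟩ := hr
  refine ⟨by rw [pvMergeRow_length, hlen], ?_⟩
  intro v hv
  rw [pvMergeRow_getD dp mask row v (by omega)]
  exact pvMergeAt_ok hdp mask v _ (hb v hv).1 (hb v hv).2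

theorem pvRowOK_set_zero {n : Nat} {row : List Int} (hr : pvRowOK n row) (i : Nat) :
    pvRowOK n (row.set i 0) := by
  by_cases hi : i < row.length
  · refine ⟨by rw [List.length_set]; exact hr.1, ?_⟩
    intro v hv
    by_cases hiv : i = v
    · subst hiv
      rw [pv_getD_set_self _ _ _ _ hi]
      norm_num [pvInf]
    · rw [pv_getD_set_ne _ _ _ _ _ hiv]
      exact hr.2 v hv
  · rw [List.set_eq_of_length_le (by omega)]
    exact hr

theorem pvInitDp_ok (n k : Nat) (terminals : List Int) :
    pvDpOK n (pvInitDp n k terminals) := by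
  show pvDpOK n ((List.zip (List.range k) terminals).foldl _ _)
  generalize List.zip (List.range k) terminals = L
  have hbase : pvDpOK n (List.replicate (1 <<< k) (List.replicate n pvInf)) := by
    intro r hr
    rw [List.eq_of_mem_replicate hr]
    refine ⟨List.length_replicate, ?_⟩
    intro v hv
    rw [List.getD_eq_getElem _ _ (by simpa using hv)]
    simp [pvInf]
  generalize (List.replicate (1 <<< k) (List.replicate n pvInf)) = dp0 at hbase
  induction L generalizing dp0 with
  | nil => exact hbase
  | cons it L ih =>
    simp only [List.foldl_cons]
    refine ih _ ?_
    by_cases hidx : 1 <<< it.1 < dp0.length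
    · intro r hr
      rcases List.mem_or_eq_of_mem_set hr with h | h
      · exact hbase _ h
      · subst h
        refine pvRowOK_set_zero ?_ _
        rw [List.getD_eq_getElem _ _ hidx]
        exact hbase _ (List.getElem_mem hidx)
    · rw [List.set_eq_of_length_le (by omega)]
      exact hbase

theorem pvMaskFold (graph : List (List (Int × Int))) (hgood : pvGood graph.length graph) :
    ∀ (L : List Nat) (dp : List (List Int)), pvDpOK graph.length dp →
    (L.foldl (fun dp mask => dp.set mask (pvHeapPhase graph (pvMergeRow dp mask (dp.getD mask [])))) dp
     = L.foldl (fun dp mask => dp.set mask (pvArrayPhase graph (pvMergeRow dp mask (dp.getD mask [])))) dp)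
    ∧ pvDpOK graph.length
      (L.foldl (fun dp mask => dp.set mask (pvArrayPhase graph (pvMergeRow dp mask (dp.getD mask [])))) dp) := by
  intro L
  induction L with
  | nil => intro dp hdp; exact ⟨rfl, hdp⟩
  | cons mask L ih =>
    intro dp hdp
    simp only [List.foldl_cons]
    by_cases hm : mask < dp.length
    · have hrow : pvRowOK graph.length (dp.getD mask []) := by
        rw [List.getD_eq_getElem _ _ hm]
        exact hdp _ (List.getElem_mem hm)
      have hmrg : pvRowOK graph.length (pvMergeRow dp mask (dp.getD mask [])) :=
        pvMergeRow_ok hdp mask hrow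
      have hlenm : (pvMergeRow dp mask (dp.getD mask [])).length = graph.length := hmrg.1
      have hpe : pvHeapPhase graph (pvMergeRow dp mask (dp.getD mask []))
          = pvArrayPhase graph (pvMergeRow dp mask (dp.getD mask [])) := by
        refine pvPhase_eq graph _ (by rw [hlenm]; exact hgood) ?_
        intro v hv
        exact hmrg.2 v (by omega)
      have hpost := pvArrayPhase_post graph (pvMergeRow dp mask (dp.getD mask []))
        (by rw [hlenm]; exact hgood) (fun v hv => hmrg.2 v (by omega))
      have hnew : pvRowOK graph.length (pvArrayPhase graph (pvMergeRow dp mask (dp.getD mask []))) := by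
        refine ⟨by rw [hpost.1, hlenm], ?_⟩
        intro v hv
        have := hpost.2.1 v (by omega)
        exact ⟨this.2.1, this.2.2.1⟩
      have hdp' : pvDpOK graph.length
          (dp.set mask (pvArrayPhase graph (pvMergeRow dp mask (dp.getD mask [])))) := by
        intro r hr
        rcases List.mem_or_eq_of_mem_set hr with h | h
        · exact hdp _ h
        · subst h; exact hnew
      rw [hpe]
      exact ih _ hdp'
    · have hrow0 : dp.getD mask [] = [] := List.getD_eq_default _ _ (by omega)
      have hmrg0 : pvMergeRow dp mask (dp.getD mask []) = [] := by rw [hrow0]; rfl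
      have hpe : pvHeapPhase graph (pvMergeRow dp mask (dp.getD mask []))
          = pvArrayPhase graph (pvMergeRow dp mask (dp.getD mask [])) := by
        rw [hmrg0]; rfl
      rw [hpe]
      refine ih _ ?_
      rw [List.set_eq_of_length_le (by omega)]
      exact hdp

-- ===== VERDICT (by name: the statement is the Claim_ definition above) =====
theorem tree_steiner_tree_spec : Claim_equal_tree_steiner_tree := by
  intro graph terminals _ hpre
  obtain ⟨hn, hrest⟩ := hpre
  show tree_steiner_tree graph terminals = tree_steiner_tree_alt graph terminals
  rcases hrest with hempty | ⟨hterm, hedge⟩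
  · subst hempty
    rfl
  have hgood : pvGood graph.length graph := by
    intro r hr e he
    obtain ⟨h1, h2, h3⟩ := hedge r hr e he
    exact ⟨h1, by omega, h3⟩
  have h := pvMaskFold graph hgood (List.range' 1 (1 <<< terminals.length - 1))
    (pvInitDp graph.length terminals.length terminals)
    (pvInitDp_ok graph.length terminals.length terminals)
  simp only [tree_steiner_tree, tree_steiner_tree_alt]
  rw [h.1]
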